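-- pv_equiv track=rewrite | github.com/chimy2/CodingTest | Practice/src/coding_basic_training/TraverseDiagonalOf2DArray.py | solution
-- ===== SOURCE A (Python) =====
-- def solution(board, k):
--     answer = 0
--     for i in range(len(board)):
--         j = 0
--         while j < len(board[0]) and i + j < k:
--             answer += board[i][j]
--             j += 1
--     return answer
-- ===== SOURCE B (Python) =====
-- def solution(board, k):
--     if not board:
--         return 0
--     w = len(board[0])
--     n = len(board)
--     total = 0
--     for d in range(min(k, n + w - 1)):
--         for i in range(n):
--             j = d - i
--             if 0 <= j < w:
--                 total += board[i][j]
--     return total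
-- ===== Notes on version B (the rewrite author's own statement) =====
-- stated objective: alternative
-- what changed: B traverses the board by anti-diagonals d = i+j < min(k, rows+cols-1) instead of A's per-row while-loop that scans each row's prefix until i+j reaches k.
import Mathlib
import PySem

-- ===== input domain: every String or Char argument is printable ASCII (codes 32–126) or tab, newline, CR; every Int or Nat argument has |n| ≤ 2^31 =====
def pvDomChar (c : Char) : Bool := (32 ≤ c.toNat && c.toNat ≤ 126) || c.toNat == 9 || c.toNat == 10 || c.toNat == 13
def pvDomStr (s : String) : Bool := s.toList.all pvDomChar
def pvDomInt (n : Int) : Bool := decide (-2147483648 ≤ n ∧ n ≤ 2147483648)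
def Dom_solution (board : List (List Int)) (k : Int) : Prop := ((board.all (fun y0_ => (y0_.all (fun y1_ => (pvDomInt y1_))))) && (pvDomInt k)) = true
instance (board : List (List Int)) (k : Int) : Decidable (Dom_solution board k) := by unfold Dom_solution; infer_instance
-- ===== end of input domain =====

-- B sums the board along anti-diagonals d = i + j, d < min(k, rows+cols-1),
-- instead of A's per-row while-loop that scans each row's prefix until i + j reaches k.

-- ===== PORT A =====
-- inner while loop of A: 'while j < len(board[0]) and i + j < k: answer += board[i][j]; j += 1';
-- fuel = w.toNat bounds the loop (j starts at 0 and only increments, and j < w is part of the guard)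
def solGoA (row : List Int) (w k i : Int) : Nat → Int → Int → Int
  | 0, _, acc => acc
  | fuel + 1, j, acc =>
    if j < w ∧ i + j < k then
      solGoA row w k i fuel (j + 1) (acc + (PySem.List.pyGet? row j).getD 0)
    else acc

def solution (board : List (List Int)) (k : Int) : Int :=
  (List.range board.length).foldl
    (fun acc (i : Nat) =>
      let w : Int := (board.headD []).length   -- len(board[0]); the loop body runs only when board ≠ []
      solGoA ((PySem.List.pyGet? board (i : Int)).getD []) w k (i : Int) w.toNat 0 acc)
    0

-- ===== PORT B =====
-- inner loop of B: 'for i in range(n): j = d - i; if 0 <= j < w: total += board[i][j]'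
def solGoB (board : List (List Int)) (w : Int) (d : Int) (acc : Int) : Int :=
  (List.range board.length).foldl
    (fun acc (i : Nat) =>
      let j : Int := d - (i : Int)
      if 0 ≤ j ∧ j < w then
        acc + (PySem.List.pyGet? ((PySem.List.pyGet? board (i : Int)).getD []) j).getD 0
      else acc)
    acc

def solution_alt (board : List (List Int)) (k : Int) : Int :=
  match board with
  | [] => 0
  | _ :: _ =>
    let w : Int := (board.headD []).length
    let n : Int := board.length
    (PySem.List.pyRange 0 (min k (n + w - 1)) 1).foldl
      (fun acc d => solGoB board w d acc) 0

-- ===== PRECONDITION & SPEC =====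
-- Exactly the inputs where the Python A returns without an IndexError: every row i must be
-- long enough for the cells A's scan visits, i.e. len(board[i]) ≥ min(len(board[0]), k - i).
def Pre_solution (board : List (List Int)) (k : Int) : Prop :=
  ∀ p ∈ board.zipIdx, ((p.1.length : Int) ≥ min ((board.headD []).length : Int) (k - (p.2 : Int)))
instance (board : List (List Int)) (k : Int) : Decidable (Pre_solution board k) := by
  unfold Pre_solution; infer_instance

def pvWitness_solution : List (List Int) × Int := ([[1, 2], [3, 4]], 3)

def Spec_solution (board : List (List Int)) (k : Int) (out : Int) : Prop := out = solution_alt board k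
instance (board : List (List Int)) (k : Int) (out : Int) : Decidable (Spec_solution board k out) := by
  unfold Spec_solution; infer_instance

-- ===== CLAIM (what is proved, stated in full; the proofs are below) =====
def Claim_equal_solution : Prop := ∀ (board : List (List Int)) (k : Int), Dom_solution board k → Pre_solution board k → Spec_solution board k (solution board k)

-- ===== LEMMAS AND PROOFS =====

-- the value A/B read at cell (i, j): board[i][j] (0 where either index is out of range —
-- such cells never contribute under either port's guards, so the lemmas below need no Pre_)
def cellI (board : List (List Int)) (i : Nat) (j : Int) : Int :=
  (PySem.List.pyGet? ((PySem.List.pyGet? board (i:Int)).getD []) j).getD 0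

lemma goA_sum (board : List (List Int)) (wN : Nat) (k : Int) (i : Nat) :
    ∀ (fuel j : Nat) (acc : Int), wN ≤ fuel + j →
    solGoA ((PySem.List.pyGet? board (i:Int)).getD []) (wN:Int) k (i:Int) fuel (j:Int) acc
      = acc + ∑ t ∈ Finset.Ico j wN, (if (i:Int) + (t:Int) < k then cellI board i (t:Int) else 0) := by
  intro fuel
  induction fuel with
  | zero =>
    intro j acc h
    have he : Finset.Ico j wN = ∅ := Finset.Ico_eq_empty (by omega)
    simp [solGoA, he]
  | succ fuel ih =>
    intro j acc h
    by_cases hc : ((j:Int) < (wN:Int) ∧ (i:Int) + (j:Int) < k)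
    · have hj : j < wN := by exact_mod_cast hc.1
      rw [solGoA, if_pos hc]
      have hrec := ih (j+1) (acc + (PySem.List.pyGet? ((PySem.List.pyGet? board (i:Int)).getD []) (j:Int)).getD 0) (by omega)
      push_cast at hrec
      rw [hrec, Finset.sum_eq_sum_Ico_succ_bot hj, if_pos hc.2]
      show _ = acc + (cellI board i (j:Int) + _)
      unfold cellI
      ring
    · rw [solGoA, if_neg hc]
      have hz : ∑ t ∈ Finset.Ico j wN, (if (i:Int) + (t:Int) < k then cellI board i (t:Int) else 0) = 0 := by
        apply Finset.sum_eq_zero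
        intro t ht
        rw [Finset.mem_Ico] at ht
        rw [if_neg]
        push Not at hc
        intro hlt
        by_cases hw : (j:Int) < (wN:Int)
        · have := hc hw
          have : (j:Nat) ≤ t := ht.1
          omega
        · have : wN ≤ j := by omega
          omega
      rw [hz]; ring

-- what A adds for row i
def rowF (board : List (List Int)) (k : Int) (i : Nat) : Int :=
  ∑ t ∈ Finset.range (board.headD []).length, (if (i:Int) + (t:Int) < k then cellI board i (t:Int) else 0)

lemma solution_eq_sum (board : List (List Int)) (k : Int) :
    solution board k = ∑ i ∈ Finset.range board.length, rowF board k i := by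
  unfold solution
  have hcg := PySem.List.foldl_congr_mem (List.range board.length)
      (fun acc (i : Nat) =>
        let w : Int := (board.headD []).length
        solGoA ((PySem.List.pyGet? board (i : Int)).getD []) w k (i : Int) w.toNat 0 acc)
      (fun acc i => acc + rowF board k i) 0
      (by
        intro acc i _
        show solGoA _ _ _ _ _ ((0:Nat):Int) acc = acc + rowF board k i
        rw [Int.toNat_natCast]
        rw [goA_sum board ((board.headD []).length) k i ((board.headD []).length) 0 acc (by omega)]
        rw [rowF, Finset.range_eq_Ico])
  rw [hcg, PySem.List.foldl_add, zero_add]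
  rfl

-- what B adds for diagonal d at row i
def diagG (board : List (List Int)) (d : Nat) (i : Nat) : Int :=
  if 0 ≤ (d:Int) - (i:Int) ∧ (d:Int) - (i:Int) < ((board.headD []).length : Int) then
    cellI board i ((d:Int) - (i:Int)) else 0

lemma goB_sum (board : List (List Int)) (d : Nat) (acc : Int) :
    solGoB board ((board.headD []).length : Int) (d:Int) acc
      = acc + ∑ i ∈ Finset.range board.length, diagG board d i := by
  unfold solGoB
  have hcg := PySem.List.foldl_congr_mem (List.range board.length)
      (fun acc (i : Nat) =>
        let j : Int := (d:Int) - (i : Int)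
        if 0 ≤ j ∧ j < ((board.headD []).length : Int) then
          acc + (PySem.List.pyGet? ((PySem.List.pyGet? board (i : Int)).getD []) j).getD 0
        else acc)
      (fun acc i => acc + diagG board d i) acc
      (by
        intro acc i _
        show (if _ then _ else _) = acc + diagG board d i
        unfold diagG cellI
        split_ifs with h
        · rfl
        · ring)
  rw [hcg, PySem.List.foldl_add]
  rfl

lemma alt_eq_sum (board : List (List Int)) (k : Int) (hne : board ≠ []) :
    solution_alt board k
      = ∑ d ∈ Finset.range ((min k ((board.length:Int) + ((board.headD []).length:Int) - 1)).toNat),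
          ∑ i ∈ Finset.range board.length, diagG board d i := by
  obtain ⟨b, bs, rfl⟩ := List.exists_cons_of_ne_nil hne
  show (PySem.List.pyRange 0 (min k _) 1).foldl (fun acc d => solGoB (b::bs) _ d acc) 0 = _
  rw [PySem.List.pyRange_one]
  rw [List.foldl_map]
  have hcg := PySem.List.foldl_congr_mem
      (List.range ((min k (((b::bs).length:Int) + (((b::bs).headD []).length:Int) - 1)) - 0).toNat)
      (fun acc (d : Nat) => solGoB (b::bs) (((b::bs).headD []).length : Int) (0 + (d:Int)) acc)
      (fun acc d => acc + ∑ i ∈ Finset.range (b::bs).length, diagG (b::bs) d i) 0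
      (by
        intro acc d _
        show solGoB _ _ (0 + (d:Int)) acc = _
        rw [zero_add]
        exact goB_sum (b::bs) d acc)
  rw [hcg, PySem.List.foldl_add, zero_add]
  norm_num
  rfl

-- the re-indexing d = i + t: for a fixed row i, B's diagonal contributions sum to A's row sum
lemma diag_row (board : List (List Int)) (k : Int) (i : Nat) (hi : i < board.length) :
    ∑ d ∈ Finset.range ((min k ((board.length:Int) + ((board.headD []).length:Int) - 1)).toNat),
        diagG board d i = rowF board k i := by
  set wN := (board.headD []).length with hw
  set D := (min k ((board.length:Int) + (wN:Int) - 1)).toNat with hD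
  have hL : (Finset.range D).filter (fun d : Nat => 0 ≤ (d:Int) - (i:Int) ∧ (d:Int) - (i:Int) < (wN:Int))
      = Finset.Ico i (min D (i + wN)) := by
    ext d; simp [Finset.mem_filter, Finset.mem_Ico]; omega
  have hR : (Finset.range wN).filter (fun t : Nat => (i:Int) + (t:Int) < k)
      = Finset.range (min wN ((k - (i:Int)).toNat)) := by
    ext t; simp [Finset.mem_filter]; omega
  have hbound : min D (i + wN) - i = min wN ((k - (i:Int)).toNat) := by
    rw [hD]; omega
  calc ∑ d ∈ Finset.range D, diagG board d i
      = ∑ d ∈ (Finset.range D).filter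
          (fun d : Nat => 0 ≤ (d:Int) - (i:Int) ∧ (d:Int) - (i:Int) < (wN:Int)),
          cellI board i ((d:Int) - (i:Int)) := by
        rw [Finset.sum_filter]; rfl
    _ = ∑ d ∈ Finset.Ico i (min D (i + wN)), cellI board i ((d:Int) - (i:Int)) := by rw [hL]
    _ = ∑ t ∈ Finset.range (min D (i + wN) - i), cellI board i (((i + t : Nat):Int) - (i:Int)) := by
        rw [Finset.sum_Ico_eq_sum_range]
    _ = ∑ t ∈ Finset.range (min wN ((k - (i:Int)).toNat)), cellI board i (t:Int) := by
        rw [hbound]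
        apply Finset.sum_congr rfl
        intro t _
        congr 1
        push_cast
        ring
    _ = rowF board k i := by
        rw [rowF, ← hw, ← hR, Finset.sum_filter]

theorem ab_eq (board : List (List Int)) (k : Int) : solution board k = solution_alt board k := by
  cases board with
  | nil => rfl
  | cons b bs =>
    rw [solution_eq_sum, alt_eq_sum _ _ (by simp), Finset.sum_comm]
    apply Finset.sum_congr rfl
    intro i hi
    exact (diag_row (b :: bs) k i (Finset.mem_range.mp hi)).symm

-- ===== VERDICT (by name: the statement is the Claim_ definition above) =====
theorem solution_spec : Claim_equal_solution := by
  intro board k _ _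
  show solution board k = solution_alt board k
  exact ab_eq board k
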